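-- pv_equiv track=rewrite | github.com/Nikhil690/low_iq_hacking | practical-11-product-cipher/product_cipher.py | get_key_order
-- ===== SOURCE A (Python) =====
-- def get_key_order(keyword):
--     """Get column order based on alphabetical sorting of keyword."""
--     keyword = keyword.upper().replace(" ", "")
--     indexed = [(char, i) for i, char in enumerate(keyword)]
--     sorted_indexed = sorted(indexed, key=lambda x: (x[0], x[1]))
--
--     order = [0] * len(keyword)
--     for new_pos, (_, old_pos) in enumerate(sorted_indexed):
--         order[old_pos] = new_pos
--     return order
-- ===== SOURCE B (Python) =====
-- def get_key_order(keyword):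
--     """Get column order based on alphabetical sorting of keyword."""
--     k = keyword.upper().replace(" ", "")
--     below = {}   # char -> how many characters of k sort strictly before it
--     seen = {}    # char -> occurrences of it so far
--     order = []
--     for c in k:
--         if c not in below:
--             below[c] = sum(d < c for d in k)
--         e = seen.get(c, 0)
--         order.append(below[c] + e)
--         seen[c] = e + 1
--     return order
-- ===== Notes on version B (the rewrite author's own statement) =====
-- stated objective: alternative
-- what changed: Replaces A's sort-then-scatter (sort the (char,index) pairs, then write each new position into a preallocated list) by a single counting pass: each column's order is (number of strictly smaller characters anywhere, memoized per character) plus (occurrences of the same character seen so far), which is exactly the lexicographic (char,index) rank — no sort and no list mutation.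
import Mathlib
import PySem

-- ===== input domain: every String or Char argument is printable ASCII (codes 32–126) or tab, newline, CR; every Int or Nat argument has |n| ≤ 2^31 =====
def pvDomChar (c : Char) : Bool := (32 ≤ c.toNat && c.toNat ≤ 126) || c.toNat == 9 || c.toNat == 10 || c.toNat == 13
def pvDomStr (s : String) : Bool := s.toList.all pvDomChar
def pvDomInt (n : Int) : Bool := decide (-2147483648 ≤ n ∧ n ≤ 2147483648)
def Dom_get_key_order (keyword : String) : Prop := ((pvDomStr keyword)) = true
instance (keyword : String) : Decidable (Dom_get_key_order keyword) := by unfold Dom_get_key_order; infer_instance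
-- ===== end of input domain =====

-- B replaces A's sort-then-scatter by a single counting pass: each column's order is the number of
-- strictly smaller characters anywhere (memoized per character) plus the occurrences of the same
-- character seen so far — an alternative decomposition of the same permutation, no sort, no mutation.

-- ===== PORT A =====
-- sorted(…, key=lambda x: (x[0], x[1])) : the tuple key is the lexicographic order, ported as the
-- Lex product order via toLex.  order[old_pos] = new_pos : old_pos comes from enumerate, hence is
-- a valid non-negative index, so List.set at old_pos.toNat is exact there.
def get_key_order (keyword : String) : List Int :=
  let kw := PySem.Chars.replace (PySem.Chars.upper keyword.toList) [' '] []
  let indexed := (PySem.List.enumerate kw).map (fun p => (p.2, p.1))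
  let sorted_indexed := PySem.List.sorted indexed (fun x => toLex (x.1, x.2)) false
  let order := List.replicate kw.length (0 : Int)
  (PySem.List.enumerate sorted_indexed).foldl (fun ord q => ord.set q.2.2.toNat q.1) order

-- ===== PORT B =====
-- sum(d < c for d in k) : a Python sum of booleans is a count, ported as countP cast to Int.
-- below[c] : the key was just ensured present, so the lookup cannot raise; getD is exact there.
def get_key_order_alt (keyword : String) : List Int :=
  let kw := PySem.Chars.replace (PySem.Chars.upper keyword.toList) [' '] []
  let st := kw.foldl (fun st c =>
      let below := if st.1.contains c = false
        then st.1.insert c ((kw.countP (fun d => decide (d < c)) : Int))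
        else st.1
      let e := st.2.1.getD c 0
      (below, st.2.1.insert c (e + 1), st.2.2 ++ [below.getD c 0 + e]))
    ((PySem.Dict.empty : PySem.Dict Char Int), (PySem.Dict.empty : PySem.Dict Char Int),
      ([] : List Int))
  st.2.2

-- ===== PRECONDITION & SPEC =====
def Spec_get_key_order (keyword : String) (out : List Int) : Prop := out = get_key_order_alt keyword
instance (keyword : String) (out : List Int) : Decidable (Spec_get_key_order keyword out) := by unfold Spec_get_key_order; infer_instance

-- ===== CLAIM (what is proved, stated in full; the proofs are below) =====
def Claim_equal_get_key_order : Prop := ∀ (keyword : String), Dom_get_key_order keyword → Spec_get_key_order keyword (get_key_order keyword)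

-- ===== LEMMAS AND PROOFS =====

-- the scatter loop preserves the list length
lemma pvScatterLen (us : List (Int × (Char × Int))) (o : List Int) :
    (us.foldl (fun ord q => ord.set q.2.2.toNat q.1) o).length = o.length := by
  induction us generalizing o with
  | nil => rfl
  | cons u t ih => simp [List.foldl_cons, ih, List.length_set]

-- updates that never touch position p leave entry p unchanged
lemma pvScatterSkip (p : Nat) (us : List (Int × (Char × Int))) (o : List Int)
    (h : ∀ u ∈ us, u.2.2.toNat ≠ p) :
    (us.foldl (fun ord q => ord.set q.2.2.toNat q.1) o)[p]? = o[p]? := by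
  induction us generalizing o with
  | nil => rfl
  | cons u t ih =>
    rw [List.foldl_cons, ih _ (fun v hv => h v (List.mem_cons_of_mem _ hv)),
      List.getElem?_set_ne (h u (List.mem_cons_self))]

-- in a strictly increasing list, the count of strictly smaller elements is the position
lemma pvRankCount (l1 l2 : List (Char × Int)) (x : Char × Int)
    (h : (l1 ++ x :: l2).Pairwise (fun a b => toLex a < toLex b)) :
    (l1 ++ x :: l2).countP (fun y => decide (toLex y < toLex x)) = l1.length := by
  rw [List.pairwise_append] at h
  obtain ⟨h1, h2, h3⟩ := h
  rw [List.countP_append, List.countP_cons]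
  have e1 : l1.countP (fun y => decide (toLex y < toLex x)) = l1.length :=
    List.countP_eq_length.mpr (fun a ha => decide_eq_true (h3 a ha x List.mem_cons_self))
  have e2 : l2.countP (fun y => decide (toLex y < toLex x)) = 0 :=
    List.countP_eq_zero.mpr (fun a ha => by
      simpa using le_of_lt ((List.pairwise_cons.mp h2).1 a ha))
  simp [e1, e2]

-- A's sort-then-scatter equals the lexicographic rank-count map, over the preprocessed list
lemma pvMain (cs : List Char) :
    (PySem.List.enumerate
        (PySem.List.sorted ((PySem.List.enumerate cs).map (fun p => (p.2, p.1)))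
          (fun x => toLex (x.1, x.2)) false)).foldl
      (fun ord q => ord.set q.2.2.toNat q.1) (List.replicate cs.length (0 : Int))
    = (PySem.List.enumerate cs).map
        (fun pc => (((PySem.List.enumerate cs).countP
            (fun q => q.2 < pc.2 || (q.2 == pc.2 && q.1 < pc.1))) : Int)) := by
  set e := PySem.List.enumerate cs with he
  set ps := e.map (fun p => (p.2, p.1)) with hps
  set S := PySem.List.sorted ps (fun x => toLex (x.1, x.2)) false with hS
  have hlen_e : e.length = cs.length := PySem.List.length_enumerate cs 0
  have hlen_ps : ps.length = cs.length := by simp [hps, hlen_e]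
  have hperm : S.Perm ps := PySem.List.sorted_perm ps _ false
  have hlen_S : S.length = cs.length := hperm.length_eq.trans hlen_ps
  have hps_get : ∀ (p : Nat) (hp : p < cs.length),
      ps[p]'(by omega) = (cs[p], (p : Int)) := by
    intro p hp
    simp [hps, he, PySem.List.getElem_enumerate]
  have hsnd : ps.Pairwise (fun a b => a.2 < b.2) := by
    rw [hps, List.pairwise_map]
    exact PySem.List.pairwise_lt_enumerate cs 0
  have hps_nodup : ps.Nodup :=
    hsnd.imp (fun {a b} hlt heq => absurd (heq ▸ hlt) (lt_irrefl _))
  have hS_nodup : S.Nodup := hperm.nodup_iff.mpr hps_nodup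
  have hSlt : S.Pairwise (fun a b => toLex a < toLex b) := by
    have h1 := PySem.List.sorted_pairwise ps (fun x => toLex (x.1, x.2))
    rw [← hS] at h1
    refine (h1.and hS_nodup).imp ?_
    intro a b hab
    exact lt_of_le_of_ne hab.1 (fun hc => hab.2 (toLex_inj.mp hc))
  have hS_mem : ∀ x ∈ S, ∃ (k : Nat) (hk : k < cs.length), x = (cs[k], (k : Int)) := by
    intro x hx
    have hxp : x ∈ ps := hperm.mem_iff.mp hx
    rw [hps] at hxp
    obtain ⟨y, hy, hxy⟩ := List.mem_map.mp hxp
    obtain ⟨k, hk, hyk⟩ := (PySem.List.mem_enumerate_iff _ _ _).mp hy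
    exact ⟨k, hk, by simp [← hxy, hyk]⟩
  have hsndS_nodup : (S.map (·.2)).Nodup := by
    refine ((hperm.map (·.2)).nodup_iff).mpr ?_
    exact (List.pairwise_map.mpr hsnd).imp
      (fun {a b} hlt heq => absurd (heq ▸ hlt) (lt_irrefl _))
  apply List.ext_getElem
  · rw [pvScatterLen, List.length_replicate, List.length_map, hlen_e]
  intro p h1 h2
  have hp : p < cs.length := by
    rw [List.length_map, hlen_e] at h2; exact h2
  -- the position r of (cs[p], p) in the sorted list
  have hmem : (cs[p], (p : Int)) ∈ S := by
    rw [hperm.mem_iff, ← hps_get p hp]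
    exact List.getElem_mem _
  obtain ⟨r, hrlt, hSr⟩ := List.getElem_of_mem hmem
  -- uniqueness of that position
  have huniq : ∀ (r' : Nat), (hr' : r' < S.length) → (S[r']'hr').2 = (p : Int) → r' = r := by
    intro r' hr' hsnd'
    have hmm : (S.map (·.2))[r']'(by simpa using hr') = (S.map (·.2))[r]'(by simpa using hrlt) := by
      simp only [List.getElem_map]
      rw [hsnd', hSr]
    exact (List.Nodup.getElem_inj_iff hsndS_nodup).mp hmm
  -- LHS entry: the scatter writes r at position p and never touches it afterwards
  have hsplit : S = S.take r ++ S[r] :: S.drop (r + 1) := by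
    rw [List.getElem_cons_drop, List.take_append_drop]
  have htakelen : (S.take r).length = r := by simp; omega
  have hLHS :
      ((PySem.List.enumerate S).foldl (fun ord q => ord.set q.2.2.toNat q.1)
        (List.replicate cs.length (0 : Int)))[p]? = some ((0 : Int) + r) := by
    conv_lhs => rw [hsplit]
    rw [PySem.List.enumerate_append, PySem.List.enumerate_cons, List.foldl_append,
      List.foldl_cons, htakelen]
    rw [pvScatterSkip]
    · rw [hSr]
      have hl : ((PySem.List.enumerate (S.take r)).foldl
          (fun ord q => ord.set q.2.2.toNat q.1)
          (List.replicate cs.length (0 : Int))).length = cs.length := by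
        rw [pvScatterLen, List.length_replicate]
      simp [hl, hp]
    · -- every later update touches an index ≠ p
      intro u hu
      obtain ⟨k, hk, huk⟩ := (PySem.List.mem_enumerate_iff _ _ _).mp hu
      have hdk : (S.drop (r + 1))[k] = S[r + 1 + k]'(by simp at hk; omega) := by
        rw [List.getElem_drop]
      intro hcon
      obtain ⟨m, hm, hxm⟩ := hS_mem (S[r + 1 + k]'(by simp at hk; omega))
        (List.getElem_mem _)
      have hu2 : u.2.2 = (m : Int) := by rw [huk]; simp [hdk, hxm]
      have : m = p := by rw [hu2] at hcon; simpa using hcon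
      have := huniq (r + 1 + k) (by simp at hk; omega) (by subst this; rw [hxm])
      omega
  -- RHS entry is the same rank, computed by counting
  have hcount : e.countP (fun q =>
        q.2 < cs[p] || (q.2 == cs[p] && q.1 < ((0 : Int) + p))) = r := by
    have h1 : e.countP (fun q =>
          q.2 < cs[p] || (q.2 == cs[p] && q.1 < ((0 : Int) + p)))
        = e.countP (fun q => decide (toLex (q.2, q.1) < toLex (cs[p], (p : Int)))) := by
      apply List.countP_congr
      intro q _
      simp [Prod.Lex.lt_iff]
    have h2 : ps.countP (fun x => decide (toLex x < toLex (cs[p], (p : Int))))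
        = e.countP (fun q => decide (toLex (q.2, q.1) < toLex (cs[p], (p : Int)))) := by
      rw [hps, List.countP_map]; rfl
    have h3 : S.countP (fun x => decide (toLex x < toLex (cs[p], (p : Int)))) = r := by
      have hsplit' := hsplit
      rw [hSr] at hsplit'
      have hSlt' := hSlt
      rw [hsplit'] at hSlt'
      conv_lhs => rw [hsplit']
      rw [pvRankCount _ _ _ hSlt']
      exact htakelen
    rw [h1, ← h2, ← hperm.countP_eq, h3]
  have hRHS : ((e.map (fun pc => ((e.countP
        (fun q => q.2 < pc.2 || (q.2 == pc.2 && q.1 < pc.1))) : Int)))[p]'h2) = (r : Int) := by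
    rw [List.getElem_map]
    have hep : e[p]'(by omega) = ((0 : Int) + p, cs[p]) := PySem.List.getElem_enumerate cs 0 p _
    rw [hep]
    simp only []
    rw [hcount]
  rw [hRHS]
  have := hLHS
  rw [List.getElem?_eq_getElem h1] at this
  have hv := Option.some.inj this
  rw [hv]
  omega

-- B-side helpers (proof-only)
def pvF (kw : List Char) (c : Char) : Int := (kw.countP (fun d => decide (d < c)) : Int)

def pvBuild (kw : List Char) : List Char → List Char → List Int
  | [], _ => []
  | c :: rest, pre => (pvF kw c + (pre.count c : Int)) :: pvBuild kw rest (pre ++ [c])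

lemma pvBuildLen (kw : List Char) : ∀ (rest pre : List Char),
    (pvBuild kw rest pre).length = rest.length := by
  intro rest
  induction rest with
  | nil => intro pre; rfl
  | cons c t ih => intro pre; simp [pvBuild, ih]

lemma pvBuildGet (kw : List Char) : ∀ (rest pre : List Char) (j : Nat) (hj : j < rest.length),
    (pvBuild kw rest pre)[j]'(by rw [pvBuildLen]; exact hj)
      = pvF kw (rest[j]'hj) + (((pre ++ rest.take j).count (rest[j]'hj) : Nat) : Int) := by
  intro rest
  induction rest with
  | nil => intro pre j hj; simp at hj
  | cons c t ih =>
    intro pre j hj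
    cases j with
    | zero => simp [pvBuild]
    | succ j' =>
      have hj' : j' < t.length := by simpa using hj
      simp only [pvBuild, List.getElem_cons_succ, List.take_succ_cons]
      rw [ih (pre ++ [c]) j' hj']
      simp

-- a count of a disjunction of disjoint predicates splits
lemma pvCountOr {α : Type} (l : List α) (p q : α → Bool)
    (h : ∀ x, ¬(p x = true ∧ q x = true)) :
    l.countP (fun x => p x || q x) = l.countP p + l.countP q := by
  induction l with
  | nil => rfl
  | cons a t ih =>
    simp only [List.countP_cons, ih]
    by_cases hp : p a = true
    · have hq : q a = false := by
        cases hqa : q a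
        · rfl
        · exact absurd ⟨hp, hqa⟩ (h a)
      simp [hp, hq]; omega
    · simp only [Bool.not_eq_true] at hp
      by_cases hq : q a = true
      · simp [hp, hq]; omega
      · simp only [Bool.not_eq_true] at hq
        simp [hp, hq]

-- counting a property of the character alone through enumerate
lemma pvCountSnd (cs : List Char) (s : Int) (c : Char) :
    (PySem.List.enumerate cs s).countP (fun q => decide (q.2 < c))
      = cs.countP (fun d => decide (d < c)) := by
  conv_rhs => rw [← PySem.List.map_snd_enumerate cs s]
  rw [List.countP_map]
  rfl

-- no index of enumerate cs s is below t ≤ s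
lemma pvCountLow (c : Char) : ∀ (cs : List Char) (s t : Int), t ≤ s →
    (PySem.List.enumerate cs s).countP (fun q => q.2 == c && decide (q.1 < t)) = 0 := by
  intro cs
  induction cs with
  | nil => intro s t _; rfl
  | cons d tl ih =>
    intro s t ht
    rw [PySem.List.enumerate_cons, List.countP_cons]
    have hd : decide ((s : Int) < t) = false := by simp; omega
    rw [ih (s + 1) t (by omega)]
    simp [hd]

-- counting equal characters with index below s + i through enumerate is a prefix count
lemma pvCountPrefix (c : Char) : ∀ (cs : List Char) (s : Int) (i : Nat),
    (PySem.List.enumerate cs s).countP (fun q => q.2 == c && decide (q.1 < s + (i : Int)))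
      = (cs.take i).count c := by
  intro cs
  induction cs with
  | nil => intro s i; simp
  | cons d tl ih =>
    intro s i
    cases i with
    | zero =>
      rw [List.take_zero, List.count_nil]
      exact (by simpa using pvCountLow c (d :: tl) s (s + 0) (by omega))
    | succ j =>
      have hfun : (fun (q : Int × Char) => q.2 == c && decide (q.1 < s + ((j + 1 : Nat) : Int)))
          = (fun (q : Int × Char) => q.2 == c && decide (q.1 < (s + 1) + (j : Int))) := by
        funext q
        have he : s + ((j + 1 : Nat) : Int) = (s + 1) + (j : Int) := by push_cast; ring
        rw [he]
      rw [PySem.List.enumerate_cons, hfun, List.countP_cons, ih (s + 1) j,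
        List.take_succ_cons, List.count_cons]
      have hlt : decide ((s : Int) < s + 1 + (j : Int)) = true := by simp; omega
      by_cases hdc : d = c
      · simp [hdc, hlt]
      · have hb : (d == c) = false := by simp [hdc]
        simp [hb]

-- the lexicographic rank-count splits into "smaller char anywhere" + "same char earlier"
lemma pvCountSplit (cs : List Char) (p : Nat) (c : Char) :
    (PySem.List.enumerate cs).countP
        (fun q => decide (q.2 < c) || (q.2 == c && decide (q.1 < ((0 : Int) + p))))
      = cs.countP (fun d => decide (d < c)) + (cs.take p).count c := by
  rw [pvCountOr]
  · rw [pvCountSnd, pvCountPrefix]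
  · rintro x ⟨h1, h2⟩
    simp only [Bool.and_eq_true, beq_iff_eq] at h2
    rw [h2.1] at h1
    simp at h1

-- the single pass maintains: below memoizes pvF, seen counts the prefix, order is pvBuild
lemma pvLoop (kw : List Char) : ∀ (rest : List Char) (below seen : PySem.Dict Char Int)
    (order : List Int) (pre : List Char),
    (∀ c v, below.get? c = some v → v = pvF kw c) →
    (∀ c, seen.getD c 0 = (pre.count c : Int)) →
    (rest.foldl (fun st c =>
        let below := if st.1.contains c = false
          then st.1.insert c ((kw.countP (fun d => decide (d < c)) : Int))
          else st.1
        let e := st.2.1.getD c 0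
        (below, st.2.1.insert c (e + 1), st.2.2 ++ [below.getD c 0 + e]))
      (below, seen, order)).2.2 = order ++ pvBuild kw rest pre := by
  intro rest
  induction rest with
  | nil => intro below seen order pre _ _; simp [pvBuild]
  | cons c t ih =>
    intro below seen order pre hbelow hseen
    rw [List.foldl_cons]
    simp only []
    -- the updated below still memoizes pvF
    have hbelow' : ∀ c' v, (if below.contains c = false
          then below.insert c ((kw.countP (fun d => decide (d < c)) : Int))
          else below).get? c' = some v → v = pvF kw c' := by
      intro c' v hv
      by_cases hc : below.contains c = false
      · rw [if_pos hc] at hv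
        by_cases hcc : c' = c
        · subst hcc
          rw [PySem.Dict.get?_insert_self] at hv
          exact (Option.some.inj hv).symm
        · rw [PySem.Dict.get?_insert_of_ne _ _ hcc] at hv
          exact hbelow c' v hv
      · rw [if_neg hc] at hv
        exact hbelow c' v hv
    -- the looked-up value is pvF kw c
    have hval : (if below.contains c = false
          then below.insert c ((kw.countP (fun d => decide (d < c)) : Int))
          else below).getD c 0 = pvF kw c := by
      by_cases hc : below.contains c = false
      · rw [if_pos hc, PySem.Dict.getD_insert_self]
        rfl
      · rw [if_neg hc]
        have hsome : (below.get? c).isSome = true := by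
          rw [← PySem.Dict.contains_eq_isSome_get?]
          simpa using hc
        obtain ⟨v, hv⟩ := Option.isSome_iff_exists.mp hsome
        rw [PySem.Dict.getD_of_get?_eq_some _ _ hv]
        exact hbelow c v hv
    -- the updated seen counts the extended prefix
    have hseen' : ∀ c', (seen.insert c (seen.getD c 0 + 1)).getD c' 0
        = ((pre ++ [c]).count c' : Int) := by
      intro c'
      by_cases hcc : c' = c
      · subst hcc
        rw [PySem.Dict.getD_insert_self, hseen, List.count_append]
        simp
      · rw [PySem.Dict.getD_insert_of_ne _ _ _ hcc, hseen, List.count_append]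
        simp [Ne.symm hcc]
    rw [ih _ _ _ _ hbelow' hseen']
    rw [hval, hseen c]
    simp [pvBuild]

-- B's single pass equals the lexicographic rank-count map, over the preprocessed list
lemma pvBmain (cs : List Char) :
    (cs.foldl (fun st c =>
        let below := if st.1.contains c = false
          then st.1.insert c ((cs.countP (fun d => decide (d < c)) : Int))
          else st.1
        let e := st.2.1.getD c 0
        (below, st.2.1.insert c (e + 1), st.2.2 ++ [below.getD c 0 + e]))
      ((PySem.Dict.empty : PySem.Dict Char Int), (PySem.Dict.empty : PySem.Dict Char Int),
        ([] : List Int))).2.2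
    = (PySem.List.enumerate cs).map
        (fun pc => (((PySem.List.enumerate cs).countP
            (fun q => q.2 < pc.2 || (q.2 == pc.2 && q.1 < pc.1))) : Int)) := by
  rw [pvLoop cs cs PySem.Dict.empty PySem.Dict.empty [] []
    (fun c v hv => by simp [PySem.Dict.get?_empty] at hv)
    (fun c => by simp [PySem.Dict.getD_empty])]
  rw [List.nil_append]
  apply List.ext_getElem
  · rw [pvBuildLen, List.length_map, PySem.List.length_enumerate]
  intro p h1 h2
  have hp : p < cs.length := by rw [pvBuildLen] at h1; exact h1
  rw [pvBuildGet cs cs [] p hp, List.getElem_map]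
  have hep : (PySem.List.enumerate cs)[p]'(by
      rw [PySem.List.length_enumerate]; exact hp) = ((0 : Int) + p, cs[p]) :=
    PySem.List.getElem_enumerate cs 0 p _
  rw [hep]
  simp only [List.nil_append]
  rw [pvCountSplit cs p (cs[p]'hp)]
  simp [pvF]
-- ===== VERDICT (by name: the statement is the Claim_ definition above) =====
theorem get_key_order_spec : Claim_equal_get_key_order := by
  intro keyword _
  unfold Spec_get_key_order get_key_order get_key_order_alt
  exact (pvMain _).trans (pvBmain _).symm
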